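-- pv_equiv track=rewrite | github.com/BoBo1529707515/BIS | 三状态分类的活动强度绘图表征.py | get_touch_spans
-- ===== SOURCE A (Python) =====
-- def get_touch_spans(t_epoch, labels_epoch):
--     """返回触摸(state2)段的 (start, end) 列表，用于背景高亮。"""
--     spans = []
--     in_seg = False
--     seg_start = None
--
--     for i in range(len(t_epoch)):
--         is_touch = (labels_epoch[i] == 2)
--         if is_touch and not in_seg:
--             in_seg = True
--             seg_start = t_epoch[i]
--         elif (not is_touch) and in_seg:
--             in_seg = False
--             seg_end = t_epoch[i]
--             spans.append((seg_start, seg_end))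
--
--     if in_seg:
--         spans.append((seg_start, t_epoch[-1]))
--
--     return spans
-- ===== SOURCE B (Python) =====
-- from itertools import groupby
--
-- def get_touch_spans(t_epoch, labels_epoch):
--     """Group (time, is_touch) pairs into maximal runs; each touch run spans from its
--     first time to the first time of the next run (or t_epoch[-1] at the end)."""
--     pairs = [(t_epoch[i], labels_epoch[i] == 2) for i in range(len(t_epoch))]
--     groups = [(key, [p[0] for p in grp]) for key, grp in groupby(pairs, key=lambda p: p[1])]
--     spans = []
--     for idx, (is_touch, times) in enumerate(groups):
--         if is_touch:
--             end = groups[idx + 1][1][0] if idx + 1 < len(groups) else t_epoch[-1]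
--             spans.append((times[0], end))
--     return spans
-- ===== Notes on version B (the rewrite author's own statement) =====
-- stated objective: idiomatic
-- what changed: Replaces A's in_seg/seg_start flag state machine by an itertools.groupby decomposition: group (time, label==2) pairs into maximal runs and emit one span per touch run, ending at the next run's first time or t_epoch[-1].
import Mathlib
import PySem

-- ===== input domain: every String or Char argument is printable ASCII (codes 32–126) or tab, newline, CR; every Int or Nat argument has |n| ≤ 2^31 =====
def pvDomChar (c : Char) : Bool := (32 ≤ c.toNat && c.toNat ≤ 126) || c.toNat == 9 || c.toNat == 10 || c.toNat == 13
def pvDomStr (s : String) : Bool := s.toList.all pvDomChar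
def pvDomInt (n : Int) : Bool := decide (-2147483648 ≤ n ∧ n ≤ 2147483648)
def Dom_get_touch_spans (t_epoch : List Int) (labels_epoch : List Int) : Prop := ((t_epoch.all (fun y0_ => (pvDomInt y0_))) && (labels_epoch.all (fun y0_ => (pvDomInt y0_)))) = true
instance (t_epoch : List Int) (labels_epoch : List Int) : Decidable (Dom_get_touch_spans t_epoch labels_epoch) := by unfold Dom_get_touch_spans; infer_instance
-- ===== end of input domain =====

-- B replaces A's in_seg/seg_start state machine by a groupby decomposition: group the
-- (time, label==2) pairs into maximal runs and emit one span per touch run (objective: idiomatic).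

-- ===== PORT A =====
def get_touch_spans (t_epoch : List Int) (labels_epoch : List Int) : List (Int × Int) :=
  let st := (PySem.List.pyRange 0 (t_epoch.length : Int) 1).foldl
    (fun (acc : List (Int × Int) × Bool × Option Int) i =>
      let is_touch := PySem.List.pyGetD labels_epoch i 0 == 2
      if is_touch && !acc.2.1 then
        (acc.1, true, some (PySem.List.pyGetD t_epoch i 0))
      else if !is_touch && acc.2.1 then
        (acc.1 ++ [(acc.2.2.getD 0, PySem.List.pyGetD t_epoch i 0)], false, acc.2.2)
      else acc)
    ([], false, none)
  if st.2.1 then st.1 ++ [(st.2.2.getD 0, PySem.List.pyGetD t_epoch (-1) 0)] else st.1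

-- ===== PORT B =====
-- itertools.groupby on the key (second component), collecting the times of each run
def pvGroupStep (x : Int) (b : Bool) : List (Bool × List Int) → List (Bool × List Int)
  | [] => [(b, [x])]
  | (c, ys) :: gs => if b == c then (c, x :: ys) :: gs else (b, [x]) :: (c, ys) :: gs

def pvGroupBy : List (Int × Bool) → List (Bool × List Int)
  | [] => []
  | p :: rest => pvGroupStep p.1 p.2 (pvGroupBy rest)

-- groups[idx+1][1][0] if there is a next group, else t_epoch[-1]
def pvNextStart (last : Int) : List (Bool × List Int) → Int
  | [] => last
  | (_, zs) :: _ => zs.headD 0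

-- the enumerate loop over the groups with its one-group lookahead
def pvEmit (last : Int) : List (Bool × List Int) → List (Int × Int)
  | [] => []
  | (b, ys) :: gs =>
    if b then (ys.headD 0, pvNextStart last gs) :: pvEmit last gs else pvEmit last gs

def get_touch_spans_alt (t_epoch : List Int) (labels_epoch : List Int) : List (Int × Int) :=
  let pairs := (PySem.List.pyRange 0 (t_epoch.length : Int) 1).map
    (fun i => (PySem.List.pyGetD t_epoch i 0, PySem.List.pyGetD labels_epoch i 0 == 2))
  let groups := pvGroupBy pairs
  pvEmit (PySem.List.pyGetD t_epoch (-1) 0) groups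

-- ===== PRECONDITION & SPEC =====
-- A raises IndexError when labels_epoch is shorter than t_epoch; only those inputs are excluded.
def Pre_get_touch_spans (t_epoch : List Int) (labels_epoch : List Int) : Prop :=
  t_epoch.length ≤ labels_epoch.length
instance (t_epoch : List Int) (labels_epoch : List Int) : Decidable (Pre_get_touch_spans t_epoch labels_epoch) := by unfold Pre_get_touch_spans; infer_instance

def pvWitness_get_touch_spans : List Int × List Int := ([0, 1, 2, 3], [2, 2, 0, 2])

def Spec_get_touch_spans (t_epoch : List Int) (labels_epoch : List Int) (out : List (Int × Int)) : Prop := out = get_touch_spans_alt t_epoch labels_epoch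
instance (t_epoch : List Int) (labels_epoch : List Int) (out : List (Int × Int)) : Decidable (Spec_get_touch_spans t_epoch labels_epoch out) := by unfold Spec_get_touch_spans; infer_instance

-- ===== CLAIM (what is proved, stated in full; the proofs are below) =====
def Claim_equal_get_touch_spans : Prop := ∀ (t_epoch : List Int) (labels_epoch : List Int), Dom_get_touch_spans t_epoch labels_epoch → Pre_get_touch_spans t_epoch labels_epoch → Spec_get_touch_spans t_epoch labels_epoch (get_touch_spans t_epoch labels_epoch)

-- ===== LEMMAS AND PROOFS =====

-- A's loop body, as a step function over a (time, is_touch) pair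
def pvStepB (acc : List (Int × Int) × Bool × Option Int) (p : Int × Bool) :
    List (Int × Int) × Bool × Option Int :=
  if p.2 && !acc.2.1 then (acc.1, true, some p.1)
  else if !p.2 && acc.2.1 then (acc.1 ++ [(acc.2.2.getD 0, p.1)], false, acc.2.2)
  else acc

-- A's finalization
def pvFin (last : Int) (st : List (Int × Int) × Bool × Option Int) : List (Int × Int) :=
  if st.2.1 then st.1 ++ [(st.2.2.getD 0, last)] else st.1

-- emission when the state machine is inside a touch segment that started at time a
def pvEmitIn (a last : Int) : List (Bool × List Int) → List (Int × Int)
  | [] => [(a, last)]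
  | (b, ys) :: gs =>
    if b then (a, pvNextStart last gs) :: pvEmit last gs
    else (a, ys.headD 0) :: pvEmit last gs

theorem pvEmit_step_true (last x : Int) (gs : List (Bool × List Int)) :
    pvEmit last (pvGroupStep x true gs) = pvEmitIn x last gs := by
  match gs with
  | [] => simp [pvGroupStep, pvEmit, pvEmitIn, pvNextStart]
  | (c, ys) :: gs' =>
    cases c <;> simp [pvGroupStep, pvEmit, pvEmitIn, pvNextStart]

theorem pvEmit_step_false (last x : Int) (gs : List (Bool × List Int)) :
    pvEmit last (pvGroupStep x false gs) = pvEmit last gs := by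
  match gs with
  | [] => simp [pvGroupStep, pvEmit]
  | (c, ys) :: gs' =>
    cases c <;> simp [pvGroupStep, pvEmit, pvNextStart]

theorem pvEmitIn_step_true (a last x : Int) (gs : List (Bool × List Int)) :
    pvEmitIn a last (pvGroupStep x true gs) = pvEmitIn a last gs := by
  match gs with
  | [] => simp [pvGroupStep, pvEmit, pvEmitIn, pvNextStart]
  | (c, ys) :: gs' =>
    cases c <;> simp [pvGroupStep, pvEmit, pvEmitIn, pvNextStart]

theorem pvEmitIn_step_false (a last x : Int) (gs : List (Bool × List Int)) :
    pvEmitIn a last (pvGroupStep x false gs) = (a, x) :: pvEmit last gs := by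
  match gs with
  | [] => simp [pvGroupStep, pvEmit, pvEmitIn]
  | (c, ys) :: gs' =>
    cases c <;> simp [pvGroupStep, pvEmit, pvEmitIn, pvNextStart]

-- core: the state machine run (plus finalization) equals the run/groupby emission
theorem pvCore (last : Int) (z : List (Int × Bool)) :
    (∀ spans s, pvFin last (z.foldl pvStepB (spans, false, s)) = spans ++ pvEmit last (pvGroupBy z)) ∧
    (∀ spans a, pvFin last (z.foldl pvStepB (spans, true, some a)) = spans ++ pvEmitIn a last (pvGroupBy z)) := by
  induction z with
  | nil => constructor <;> intro spans s <;> simp [pvFin, pvEmit, pvEmitIn, pvGroupBy]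
  | cons p rest ih =>
    obtain ⟨x, b⟩ := p
    constructor
    · intro spans s
      cases b
      · have hstep : pvStepB (spans, false, s) (x, false) = (spans, false, s) := by
          simp [pvStepB]
        simp only [List.foldl_cons, hstep, ih.1, pvGroupBy, pvEmit_step_false]
      · have hstep : pvStepB (spans, false, s) (x, true) = (spans, true, some x) := by
          simp [pvStepB]
        simp only [List.foldl_cons, hstep, ih.2, pvGroupBy, pvEmit_step_true]
    · intro spans a
      cases b
      · have hstep : pvStepB (spans, true, some a) (x, false) =
            (spans ++ [(a, x)], false, some a) := by simp [pvStepB]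
        simp only [List.foldl_cons, hstep, ih.1, pvGroupBy, pvEmitIn_step_false,
          List.append_assoc, List.singleton_append]
      · have hstep : pvStepB (spans, true, some a) (x, true) = (spans, true, some a) := by
          simp [pvStepB]
        simp only [List.foldl_cons, hstep, ih.2, pvGroupBy, pvEmitIn_step_true]

-- within bounds, indexing the zip is indexing both lists
theorem pvZipGet (t labels : List Int) (hpre : t.length ≤ labels.length) (i : Int)
    (h0 : 0 ≤ i) (h1 : i < (t.length : Int)) :
    PySem.List.pyGetD (t.zip labels) i (0, 0) =
      (PySem.List.pyGetD t i 0, PySem.List.pyGetD labels i 0) := by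
  have hit : i.toNat < t.length := by omega
  have hil : i.toNat < labels.length := by omega
  have hiz : i.toNat < (t.zip labels).length := by
    simp [List.length_zip]; omega
  rw [PySem.List.pyGetD_of_nonneg _ _ h0, PySem.List.pyGetD_of_nonneg _ _ h0,
      PySem.List.pyGetD_of_nonneg _ _ h0,
      List.getD_eq_getElem _ _ hiz, List.getD_eq_getElem _ _ hit,
      List.getD_eq_getElem _ _ hil, List.getElem_zip]

-- B's pair-building map and the composition of A's step with it
def pvPair (p : Int × Int) : Int × Bool := (p.1, p.2 == 2)

def pvStep2 (acc : List (Int × Int) × Bool × Option Int) (p : Int × Int) :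
    List (Int × Int) × Bool × Option Int :=
  pvStepB acc (pvPair p)

-- ===== VERDICT (by name: the statement is the Claim_ definition above) =====
theorem get_touch_spans_spec : Claim_equal_get_touch_spans := by
  intro t labels _ hpre
  have hpre' : t.length ≤ labels.length := hpre
  unfold Spec_get_touch_spans
  have hlen : ((t.length : Int)) = (((t.zip labels).length : Int)) := by
    simp [List.length_zip]; omega
  have hmem : ∀ (i : Int), i ∈ PySem.List.pyRange 0 (t.length : Int) →
      PySem.List.pyGetD (t.zip labels) i (0, 0) =
        (PySem.List.pyGetD t i 0, PySem.List.pyGetD labels i 0) := by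
    intro i hi
    rw [PySem.List.mem_pyRange_one] at hi
    exact pvZipGet t labels hpre' i hi.1 hi.2
  have hA : List.foldl
      (fun (acc : List (Int × Int) × Bool × Option Int) i =>
        let is_touch := PySem.List.pyGetD labels i 0 == 2
        if is_touch && !acc.2.1 then (acc.1, true, some (PySem.List.pyGetD t i 0))
        else if !is_touch && acc.2.1 then
          (acc.1 ++ [(acc.2.2.getD 0, PySem.List.pyGetD t i 0)], false, acc.2.2)
        else acc)
      ([], false, none) (PySem.List.pyRange 0 (t.length : Int)) =
      List.foldl pvStep2 ([], false, none) (t.zip labels) := by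
    rw [PySem.List.foldl_congr_mem _ _
      (fun acc j => pvStep2 acc (PySem.List.pyGetD (t.zip labels) j (0, 0))) _
      (by intro acc i hi; simp only [hmem i hi, pvStep2, pvPair, pvStepB])]
    rw [hlen]
    exact PySem.List.foldl_pyRange_zero_pyGetD' (t.zip labels) (0, 0) pvStep2 _
  have hB : List.map
      (fun i => (PySem.List.pyGetD t i 0, PySem.List.pyGetD labels i 0 == 2))
      (PySem.List.pyRange 0 (t.length : Int)) =
      List.map pvPair (t.zip labels) := by
    rw [List.map_congr_left
      (g := fun j => pvPair (PySem.List.pyGetD (t.zip labels) j (0, 0)))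
      (by intro i hi; simp only [hmem i hi, pvPair])]
    rw [hlen]
    have h0 := PySem.List.map_pyGetD_pyRange_zero' (t.zip labels) ((0 : Int), (0 : Int))
    calc List.map (fun j => pvPair (PySem.List.pyGetD (t.zip labels) j (0, 0)))
          (PySem.List.pyRange 0 ((t.zip labels).length : Int))
        = List.map pvPair (List.map (fun j => PySem.List.pyGetD (t.zip labels) j (0, 0))
            (PySem.List.pyRange 0 ((t.zip labels).length : Int))) := by
          rw [List.map_map]
          rfl
      _ = List.map pvPair (t.zip labels) := by rw [h0]
  show pvFin (PySem.List.pyGetD t (-1) 0)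
      (List.foldl
        (fun (acc : List (Int × Int) × Bool × Option Int) i =>
          let is_touch := PySem.List.pyGetD labels i 0 == 2
          if is_touch && !acc.2.1 then (acc.1, true, some (PySem.List.pyGetD t i 0))
          else if !is_touch && acc.2.1 then
            (acc.1 ++ [(acc.2.2.getD 0, PySem.List.pyGetD t i 0)], false, acc.2.2)
          else acc)
        ([], false, none) (PySem.List.pyRange 0 (t.length : Int))) =
    pvEmit (PySem.List.pyGetD t (-1) 0)
      (pvGroupBy (List.map
        (fun i => (PySem.List.pyGetD t i 0, PySem.List.pyGetD labels i 0 == 2))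
        (PySem.List.pyRange 0 (t.length : Int))))
  rw [hA, hB]
  have hcore := (pvCore (PySem.List.pyGetD t (-1) 0)
    (List.map pvPair (t.zip labels))).1 [] none
  rw [List.foldl_map] at hcore
  simpa [pvStep2] using hcore
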